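-- pv_equiv track=rewrite | github.com/jcartu/rasputin-stack | proxy/proxy_v6.py | enhance_response_text
-- ===== SOURCE A (Python) =====
-- def enhance_response_text(text: str) -> str:
--     """Post-process: improve formatting of mediocre responses."""
--     if not text or text.strip() in ("NO_REPLY", "HEARTBEAT_OK"):
--         return text
--
--     # Already well-formatted? Don't touch it
--     if "**" in text and any(ord(c) > 0x1F300 for c in text):
--         return text
--
--     lines = text.split("\n")
--     enhanced = []
--
--     for i, line in enumerate(lines):
--         stripped = line.strip()
--         if not stripped:
--             enhanced.append(line)
--             continue
--
--         # If first non-empty line has no bold, add it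
--         if i == 0 and "**" not in stripped and len(stripped) > 5 and not stripped.startswith("•") and not stripped.startswith("-"):
--             # Wrap first line in bold if it looks like a header
--             if len(stripped) < 80 and not stripped.endswith("."):
--                 enhanced.append(f"**{stripped}**")
--                 continue
--
--         enhanced.append(line)
--
--     result = "\n".join(enhanced)
--     return result
-- ===== SOURCE B (Python) =====
-- def enhance_response_text(text: str) -> str:
--     """Post-process: improve formatting of mediocre responses."""
--     if not text or text.strip() in ("NO_REPLY", "HEARTBEAT_OK"):
--         return text
--     # Already well-formatted? Don't touch it
--     if "**" in text and any(ord(c) > 0x1F300 for c in text):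
--         return text
--     # Never split into lines: partition at the first newline and either bold
--     # the head (rebuilding by concatenation) or return the input untouched.
--     head, sep, rest = text.partition("\n")
--     s = head.strip()
--     if ("**" not in s and 5 < len(s) < 80
--             and not s.startswith(("•", "-")) and not s.endswith(".")):
--         return f"**{s}**{sep}{rest}"
--     return text
-- ===== Notes on version B (the rewrite author's own statement) =====
-- stated objective: simpler
-- what changed: B never splits the text into a list of lines: it partitions the string at the first newline with str.partition, bolds the stripped head by plain string concatenation when the guards pass, and otherwise returns the input string itself untouched, replacing A's enumerate-over-all-lines rebuild-and-rejoin loop.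
import Mathlib
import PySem

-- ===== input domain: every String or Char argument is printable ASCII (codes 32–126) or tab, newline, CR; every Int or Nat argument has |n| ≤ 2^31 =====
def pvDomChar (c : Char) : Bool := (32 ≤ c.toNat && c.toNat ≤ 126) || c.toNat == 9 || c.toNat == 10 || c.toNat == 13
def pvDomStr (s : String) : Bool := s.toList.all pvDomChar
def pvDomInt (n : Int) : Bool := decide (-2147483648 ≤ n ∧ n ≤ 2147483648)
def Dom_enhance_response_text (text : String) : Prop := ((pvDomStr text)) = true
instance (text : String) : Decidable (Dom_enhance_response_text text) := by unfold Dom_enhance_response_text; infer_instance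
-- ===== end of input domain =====

-- B never splits the text into a list of lines: it partitions at the first newline
-- and either bolds the head by string concatenation or returns the input untouched
-- (objective: simpler).

-- ===== PORT A =====
-- A's per-line body of the 'for i, line in enumerate(lines)' loop (branch order kept).
def pvAStep (acc : List String) (p : Int × String) : List String :=
  let line := p.2
  let stripped := PySem.Str.strip line
  if stripped = "" then acc ++ [line]
  else if p.1 = 0 && !PySem.Str.isIn "**" stripped && PySem.Str.len stripped > 5
          && !PySem.Str.startswith stripped "•" && !PySem.Str.startswith stripped "-" then
    if PySem.Str.len stripped < 80 && !PySem.Str.endswith stripped "." then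
      acc ++ ["**" ++ stripped ++ "**"]
    else acc ++ [line]
  else acc ++ [line]

def enhance_response_text (text : String) : String :=
  if text = "" || PySem.Str.strip text = "NO_REPLY" || PySem.Str.strip text = "HEARTBEAT_OK" then
    text
  else if PySem.Str.isIn "**" text && text.toList.any (fun c => decide (0x1F300 < c.toNat)) then
    text
  else
    let lines := (PySem.Str.split? text "\n").getD []
    let enhanced := (PySem.List.enumerate lines 0).foldl pvAStep []
    PySem.Str.join "\n" enhanced

-- ===== PORT B =====
-- 'text.partition("\n")' as (head, optional remainder); exact for any string.
def pvPartNl : List Char → List Char × Option (List Char)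
  | [] => ([], none)
  | c :: r =>
    if c = '\n' then ([], some r)
    else
      let p := pvPartNl r
      (c :: p.1, p.2)

def enhance_response_text_alt (text : String) : String :=
  if text = "" || PySem.Str.strip text = "NO_REPLY" || PySem.Str.strip text = "HEARTBEAT_OK" then
    text
  else if PySem.Str.isIn "**" text && text.toList.any (fun c => decide (0x1F300 < c.toNat)) then
    text
  else
    let p := pvPartNl text.toList
    let s := PySem.Chars.strip p.1
    if !PySem.Chars.isIn "**".toList s && 5 < s.length && s.length < 80
        && !PySem.Chars.startswith s "•".toList && !PySem.Chars.startswith s "-".toList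
        && !PySem.Chars.endswith s ".".toList then
      String.ofList ("**".toList ++ s ++ "**".toList ++
        (match p.2 with
         | none => []
         | some r => '\n' :: r))
    else text

-- ===== PRECONDITION & SPEC =====
def Spec_enhance_response_text (text : String) (out : String) : Prop := out = enhance_response_text_alt text
instance (text : String) (out : String) : Decidable (Spec_enhance_response_text text out) := by unfold Spec_enhance_response_text; infer_instance

-- ===== CLAIM =====
def Claim_equal_enhance_response_text : Prop := ∀ (text : String), Dom_enhance_response_text text → Spec_enhance_response_text text (enhance_response_text text)

-- ===== LEMMAS AND PROOFS =====

-- split of a char list at every '\n' (reference model for A's lines).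
def pvSplitNl : List Char → List (List Char)
  | [] => [[]]
  | c :: r =>
    if c = '\n' then [] :: pvSplitNl r
    else
      match pvSplitNl r with
      | [] => [[c]]
      | x :: xs => (c :: x) :: xs

def pvConsHead (p : List Char) : List (List Char) → List (List Char)
  | [] => [p]
  | x :: xs => (p ++ x) :: xs

theorem pvSplitNl_ne_nil (l : List Char) : pvSplitNl l ≠ [] := by
  cases l with
  | nil => simp [pvSplitNl]
  | cons c r =>
    unfold pvSplitNl
    split_ifs
    · simp
    · cases h : pvSplitNl r <;> simp

theorem pvConsHead_consHead (p q : List Char) (L : List (List Char)) (hL : L ≠ []) :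
    pvConsHead p (pvConsHead q L) = pvConsHead (p ++ q) L := by
  cases L with
  | nil => exact absurd rfl hL
  | cons x xs => simp [pvConsHead]

theorem pvConsHead_nil_of_ne (L : List (List Char)) (hL : L ≠ []) : pvConsHead [] L = L := by
  cases L with
  | nil => exact absurd rfl hL
  | cons x xs => simp [pvConsHead]

-- A's splitOn.go on sep = ['\n'], characterised by pvSplitNl.
theorem pvGo_eq (l : List Char) : ∀ (fuel : Nat) (cur : List Char) (acc : List (List Char)),
    l.length < fuel →
    PySem.Chars.splitOn.go ['\n'] fuel l cur acc = acc.reverse ++ pvConsHead cur.reverse (pvSplitNl l) := by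
  induction l with
  | nil =>
    intro fuel cur acc h
    cases fuel with
    | zero => omega
    | succ f => simp [PySem.Chars.splitOn.go, pvSplitNl, pvConsHead]
  | cons c r ih =>
    intro fuel cur acc h
    cases fuel with
    | zero => omega
    | succ f =>
      by_cases hc : c = '\n'
      · subst hc
        rw [show PySem.Chars.splitOn.go ['\n'] (f+1) ('\n' :: r) cur acc
              = PySem.Chars.splitOn.go ['\n'] f r [] (cur.reverse :: acc) by
            simp [PySem.Chars.splitOn.go, List.isPrefixOf]]
        rw [ih f [] (cur.reverse :: acc) (by simpa using Nat.lt_of_succ_lt_succ h)]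
        simp only [List.reverse_nil]
        rw [pvConsHead_nil_of_ne _ (pvSplitNl_ne_nil r)]
        simp [pvSplitNl, pvConsHead]
      · have hc' : ¬ '\n' = c := fun h => hc h.symm
        rw [show PySem.Chars.splitOn.go ['\n'] (f+1) (c :: r) cur acc
              = PySem.Chars.splitOn.go ['\n'] f r (c :: cur) acc by
            simp [PySem.Chars.splitOn.go, List.isPrefixOf, hc']]
        rw [ih f (c :: cur) acc (by simpa using Nat.lt_of_succ_lt_succ h)]
        have hsplit : pvSplitNl (c :: r) = pvConsHead [c] (pvSplitNl r) := by
          cases hsp : pvSplitNl r with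
          | nil => exact absurd hsp (pvSplitNl_ne_nil r)
          | cons x xs => simp [pvSplitNl, hc, hsp, pvConsHead]
        rw [hsplit, pvConsHead_consHead _ _ _ (pvSplitNl_ne_nil r)]
        simp

theorem pvSplitOn_eq (l : List Char) : PySem.Chars.splitOn l ['\n'] = pvSplitNl l := by
  unfold PySem.Chars.splitOn
  rw [pvGo_eq l (l.length + 1) [] [] (by omega)]
  simpa using pvConsHead_nil_of_ne _ (pvSplitNl_ne_nil l)

-- joining the split back yields the original string.
theorem pvJoin_splitNl (l : List Char) : PySem.Chars.join ['\n'] (pvSplitNl l) = l := by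
  induction l with
  | nil => simp [pvSplitNl, PySem.Chars.join, List.intercalate]
  | cons c r ih =>
    unfold pvSplitNl
    by_cases hc : c = '\n'
    · subst hc
      rw [if_pos rfl]
      cases hsp : pvSplitNl r with
      | nil => exact absurd hsp (pvSplitNl_ne_nil r)
      | cons x xs =>
        rw [PySem.Chars.join_cons_cons]
        rw [hsp] at ih
        simp [ih]
    · rw [if_neg hc]
      cases hsp : pvSplitNl r with
      | nil => exact absurd hsp (pvSplitNl_ne_nil r)
      | cons x xs =>
        rw [hsp] at ih
        cases xs with
        | nil =>
          simp only [PySem.Chars.join_singleton] at ih ⊢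
          simp [ih]
        | cons y ys =>
          rw [PySem.Chars.join_cons_cons] at ih ⊢
          simp [ih.symm]

-- pvPartNl gives the head and remainder of pvSplitNl.
theorem pvPartNl_splitNl (l : List Char) :
    pvSplitNl l = (pvPartNl l).1 ::
      (match (pvPartNl l).2 with
       | none => []
       | some r => pvSplitNl r) := by
  induction l with
  | nil => simp [pvSplitNl, pvPartNl]
  | cons c r ih =>
    by_cases hc : c = '\n'
    · subst hc; simp [pvSplitNl, pvPartNl]
    · unfold pvSplitNl pvPartNl
      rw [if_neg hc, if_neg hc]
      rw [ih]
      cases h2 : (pvPartNl r).2 with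
      | none => simp
      | some v =>
        cases v <;> rfl

theorem pvJoin_cons (x : List Char) (t0 : Option (List Char)) :
    PySem.Chars.join ['\n'] (x :: (match t0 with | none => [] | some r => pvSplitNl r))
      = x ++ (match t0 with | none => [] | some r => '\n' :: r) := by
  cases t0 with
  | none => simp [PySem.Chars.join_singleton]
  | some r =>
    dsimp only
    cases hsp : pvSplitNl r with
    | nil => exact absurd hsp (pvSplitNl_ne_nil r)
    | cons y ys =>
      rw [PySem.Chars.join_cons_cons]
      have hj := pvJoin_splitNl r
      rw [hsp] at hj
      simp [hj]

-- Lines with index ≥ 1 pass through A's loop body unchanged.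
theorem pvStep_tail (xs : List String) : ∀ (s : Int), 1 ≤ s →
    (PySem.List.enumerate xs s).map (fun p => (pvAStep [] p).headD p.2) = xs := by
  induction xs with
  | nil => intro s _; simp [PySem.List.enumerate]
  | cons x xs ih =>
    intro s hs
    rw [PySem.List.enumerate_cons]
    simp only [List.map_cons]
    rw [ih (s + 1) (by omega)]
    have hs0 : s ≠ 0 := by omega
    simp [pvAStep, hs0]

-- A's fold rebuilds the list element-wise.
theorem pvFold_map (xs : List String) (s : Int) (acc : List String) :
    (PySem.List.enumerate xs s).foldl pvAStep acc
      = acc ++ (PySem.List.enumerate xs s).map (fun p => (pvAStep [] p).headD p.2) := by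
  induction xs generalizing s acc with
  | nil => simp [PySem.List.enumerate]
  | cons x xs ih =>
    rw [PySem.List.enumerate_cons]
    simp only [List.foldl_cons, List.map_cons]
    rw [ih]
    have h : pvAStep acc (s, x) = acc ++ (pvAStep [] (s, x)).headD x :: [] := by
      unfold pvAStep
      dsimp only
      split_ifs <;> simp
    rw [h]; simp

-- A's loop body at index 0 as a single guard.
theorem pvStep_head (l0 : String) : pvAStep [] (0, l0)
    = if !PySem.Str.isIn "**" (PySem.Str.strip l0)
        && PySem.Str.len (PySem.Str.strip l0) > 5
        && !PySem.Str.startswith (PySem.Str.strip l0) "•"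
        && !PySem.Str.startswith (PySem.Str.strip l0) "-"
        && PySem.Str.len (PySem.Str.strip l0) < 80
        && !PySem.Str.endswith (PySem.Str.strip l0) "." then
      ["**" ++ PySem.Str.strip l0 ++ "**"] else [l0] := by
  unfold pvAStep
  dsimp only
  by_cases hse : PySem.Str.strip l0 = ""
  · rw [if_pos hse, if_neg (by rw [hse]; decide)]
    simp
  · rw [if_neg hse]
    by_cases hA : (!PySem.Str.isIn "**" (PySem.Str.strip l0)
        && PySem.Str.len (PySem.Str.strip l0) > 5
        && !PySem.Str.startswith (PySem.Str.strip l0) "•"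
        && !PySem.Str.startswith (PySem.Str.strip l0) "-") = true
    · rw [if_pos (by simpa using hA)]
      by_cases hB : (PySem.Str.len (PySem.Str.strip l0) < 80
          && !PySem.Str.endswith (PySem.Str.strip l0) ".") = true
      · rw [if_pos hB, if_pos (by
          simp only [Bool.and_eq_true] at hA hB ⊢
          exact ⟨⟨hA, hB.1⟩, hB.2⟩)]
        simp
      · rw [if_neg hB, if_neg (by
          intro hc
          simp only [Bool.and_eq_true] at hc hB
          exact hB ⟨hc.1.2, hc.2⟩)]
        simp
    · rw [if_neg (by simpa using hA), if_neg (by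
        intro hc
        simp only [Bool.and_eq_true] at hc hA
        exact hA hc.1.1)]
      simp

-- ===== VERDICT =====
set_option maxHeartbeats 1000000 in
theorem enhance_response_text_spec : Claim_equal_enhance_response_text := by
  intro text _
  unfold Spec_enhance_response_text enhance_response_text enhance_response_text_alt
  split_ifs with h1 h2
  · rfl
  · rfl
  · dsimp only
    -- A's lines are pvSplitNl of the char list, mapped back to strings.
    have hlines : (PySem.Str.split? text "\n").getD []
        = (pvSplitNl text.toList).map String.ofList := by
      have h := PySem.Str.split?_map text "\n"
      rw [PySem.Chars.split?.eq_1] at h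
      simp only [show ("\n" : String).toList = ['\n'] by decide] at h
      rw [if_neg (by decide)] at h
      rw [pvSplitOn_eq] at h
      cases hs : PySem.Str.split? text "\n" with
      | none => rw [hs] at h; simp at h
      | some parts =>
        rw [hs] at h
        simp only [Option.map_some, Option.some.injEq] at h
        simp only [Option.getD_some]
        have h3 := congrArg (List.map String.ofList) h
        rw [List.map_map] at h3
        simpa [Function.comp_def, String.ofList_toList] using h3
    rw [hlines]
    -- expose the head/tail of the split via pvPartNl
    rw [pvPartNl_splitNl text.toList]
    set h0 := (pvPartNl text.toList).1 with hh0
    set t0 := (pvPartNl text.toList).2 with ht0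
    simp only [List.map_cons]
    rw [PySem.List.enumerate_cons]
    simp only [List.foldl_cons]
    rw [pvFold_map]
    rw [show (0 : Int) + 1 = 1 by norm_num, pvStep_tail _ 1 (by omega)]
    rw [pvStep_head]
    -- bridge A's String-level guard to B's Chars-level guard
    have hstrip : (PySem.Str.strip (String.ofList h0)).toList = PySem.Chars.strip h0 := by
      rw [PySem.Str.toList_strip, String.toList_ofList]
    have hguard : (!PySem.Str.isIn "**" (PySem.Str.strip (String.ofList h0))
        && PySem.Str.len (PySem.Str.strip (String.ofList h0)) > 5
        && !PySem.Str.startswith (PySem.Str.strip (String.ofList h0)) "•"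
        && !PySem.Str.startswith (PySem.Str.strip (String.ofList h0)) "-"
        && PySem.Str.len (PySem.Str.strip (String.ofList h0)) < 80
        && !PySem.Str.endswith (PySem.Str.strip (String.ofList h0)) ".")
        = (!PySem.Chars.isIn "**".toList (PySem.Chars.strip h0)
        && decide (5 < (PySem.Chars.strip h0).length)
        && decide ((PySem.Chars.strip h0).length < 80)
        && !PySem.Chars.startswith (PySem.Chars.strip h0) "•".toList
        && !PySem.Chars.startswith (PySem.Chars.strip h0) "-".toList
        && !PySem.Chars.endswith (PySem.Chars.strip h0) ".".toList) := by
      rw [PySem.Str.isIn_eq, PySem.Str.startswith_eq, PySem.Str.startswith_eq,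
        PySem.Str.endswith_eq, PySem.Str.len_eq, hstrip]
      have h5 : (decide ((5:Int) < ((PySem.Chars.strip h0).length : Int)))
          = decide (5 < (PySem.Chars.strip h0).length) := by
        simp
      have h80 : (decide (((PySem.Chars.strip h0).length : Int) < 80))
          = decide ((PySem.Chars.strip h0).length < 80) := by
        simp
      simp only [GT.gt, h5, h80]
      cases PySem.Chars.isIn "**".toList (PySem.Chars.strip h0) <;>
        cases decide (5 < (PySem.Chars.strip h0).length) <;>
        cases decide ((PySem.Chars.strip h0).length < 80) <;>
        cases PySem.Chars.startswith (PySem.Chars.strip h0) "•".toList <;>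
        cases PySem.Chars.startswith (PySem.Chars.strip h0) "-".toList <;>
        cases PySem.Chars.endswith (PySem.Chars.strip h0) ".".toList <;> rfl
    rw [hguard]
    by_cases hg : (!PySem.Chars.isIn "**".toList (PySem.Chars.strip h0)
        && decide (5 < (PySem.Chars.strip h0).length)
        && decide ((PySem.Chars.strip h0).length < 80)
        && !PySem.Chars.startswith (PySem.Chars.strip h0) "•".toList
        && !PySem.Chars.startswith (PySem.Chars.strip h0) "-".toList
        && !PySem.Chars.endswith (PySem.Chars.strip h0) ".".toList) = true
    · -- guard holds: both bold the head
      rw [if_pos hg, if_pos hg]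
      apply String.toList_injective
      rw [PySem.Str.toList_join, String.toList_ofList]
      simp only [List.map_cons, List.map_map, List.singleton_append]
      rw [show (String.toList ∘ String.ofList) = (id : List Char → List Char) by
            funext p; simp [String.toList_ofList]]
      rw [List.map_id]
      rw [String.toList_append, String.toList_append, hstrip]
      rw [pvJoin_cons]
      simp [String.toList_ofList, show ("**" : String).toList = ['*','*'] by decide,
        List.append_assoc]
    · -- guard fails: A re-joins the split, B returns text
      rw [if_neg hg, if_neg hg]
      apply String.toList_injective
      rw [PySem.Str.toList_join]
      simp only [List.map_cons, List.map_map, List.singleton_append]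
      rw [String.toList_ofList]
      rw [show (String.toList ∘ String.ofList) = (id : List Char → List Char) by
            funext p; simp [String.toList_ofList]]
      rw [List.map_id]
      rw [hh0, ht0]
      rw [String.toList_ofList]
      rw [← pvPartNl_splitNl text.toList, pvJoin_splitNl]
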